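-- pv_equiv track=rewrite | github.com/Howardhuang98/Blog | LC_problems/2156.py | subStrHash
-- ===== SOURCE A (Python) =====
-- def subStrHash(s: str, power: int, modulo: int, k: int, hashValue: int) -> str:
--     n = len(s)
--     pk = power ** k
--
--     def hash_function(i, p, m, pre):
--         """
--         hash(s[i:i+k],p,m) =
--
--         """
--
--         if not pre:
--             res = 0
--             for j, val in enumerate(s[i:i + k]):
--                 res += (ord(val) - ord('a') + 1) * p ** j
--             return res % m
--         else:
--             res = ((ord(s[i]) - ord('a') + 1) + p*pre - (ord(s[i + k]) - ord('a') + 1) * pk) % m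
--             return res
--
--     succeed = n
--     h = None
--     for i in range(n - k, -1, -1):
--         h = hash_function(i, power, modulo, h)
--         if h == hashValue:
--             succeed = i
--
--     return s[succeed: succeed+k]
-- ===== SOURCE B (Python) =====
-- def subStrHash(s: str, power: int, modulo: int, k: int, hashValue: int) -> str:
--     n = len(s)
--     for i in range(n - k + 1):
--         res = 0
--         for j in range(k):
--             res += (ord(s[i + j]) - ord('a') + 1) * power ** j
--         if res % modulo == hashValue:
--             return s[i:i + k]
--     return s[n:n + k]
-- ===== Notes on version B (the rewrite author's own statement) =====
-- stated objective: simpler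
-- what changed: Dropped the reverse-scan rolling-hash state machine (with its not-pre direct/rolling branching) for a plain left-to-right scan that recomputes each window's hash independently and returns the first match.
-- outside the precondition, e.g. on subStrHash('abc', 2, 7, -1, 0): A returns '', B returns 'ab'; on subStrHash('uL)*A"', 1, 3, -4, -1): A returns '', B returns ''
import Mathlib
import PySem

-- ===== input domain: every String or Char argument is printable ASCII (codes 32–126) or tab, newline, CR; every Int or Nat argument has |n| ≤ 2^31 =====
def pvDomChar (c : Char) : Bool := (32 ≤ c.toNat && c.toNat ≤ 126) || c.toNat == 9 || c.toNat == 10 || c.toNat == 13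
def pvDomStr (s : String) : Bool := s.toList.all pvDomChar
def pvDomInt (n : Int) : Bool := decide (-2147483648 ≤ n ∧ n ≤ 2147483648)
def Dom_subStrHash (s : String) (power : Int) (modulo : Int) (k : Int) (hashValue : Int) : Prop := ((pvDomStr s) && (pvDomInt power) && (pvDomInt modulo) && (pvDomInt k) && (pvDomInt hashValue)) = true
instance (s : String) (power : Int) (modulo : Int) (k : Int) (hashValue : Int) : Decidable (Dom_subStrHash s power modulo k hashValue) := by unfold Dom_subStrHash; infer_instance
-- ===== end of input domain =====

-- B replaces A's reverse-scan rolling-hash state machine by a plain left-to-right scan that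
-- recomputes each window hash independently and returns the first match (objective: simpler).

-- ===== PORT A =====
-- ord(s[i]) as an Int; out-of-range defaults to 0 (such an access is never reached inside Pre_)
def pvOrdAt (s : String) (i : Int) : Int :=
  ((PySem.Str.pyGet? s i).map (fun c => (c.toNat : Int))).getD 0

-- the `not pre` (direct) branch of A's hash_function: res over enumerate(s[i:i+k]), then % m
def pvDirectHash (s : String) (power : Int) (modulo : Int) (k : Int) (i : Int) : Int :=
  PySem.Int.mod
    ((PySem.List.enumerate (PySem.Str.slice s (some i) (some (i + k))).toList 0).foldl
      (fun res jv => res + ((jv.2.toNat : Int) - 97 + 1) * power ^ jv.1.toNat) 0)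
    modulo

-- A's inner hash_function(i, p, m, pre); pk is the closure-captured power ** k
def pvHashFunction (s : String) (power : Int) (modulo : Int) (k : Int) (pk : Int)
    (i : Int) (pre : Option Int) : Int :=
  match pre with
  | none => pvDirectHash s power modulo k i
  | some v =>
    if v = 0 then pvDirectHash s power modulo k i
    else PySem.Int.mod ((pvOrdAt s i - 97 + 1) + power * v - (pvOrdAt s (i + k) - 97 + 1) * pk) modulo

-- one iteration of A's for-loop: state is (succeed, h)
def pvStepA (s : String) (power : Int) (modulo : Int) (k : Int) (hashValue : Int) (pk : Int)
    (st : Int × Option Int) (i : Int) : Int × Option Int :=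
  let h : Int := pvHashFunction s power modulo k pk i st.2
  (if h == hashValue then i else st.1, some h)

def subStrHash (s : String) (power : Int) (modulo : Int) (k : Int) (hashValue : Int) : String :=
  let n : Int := PySem.Str.len s
  let pk : Int := power ^ k.toNat
  let st := (PySem.List.pyRange (n - k) (-1) (-1)).foldl
    (pvStepA s power modulo k hashValue pk) (n, none)
  PySem.Str.slice s (some st.1) (some (st.1 + k))

-- ===== PORT B =====
def pvWindowHash (s : String) (power : Int) (modulo : Int) (k : Int) (i : Int) : Int :=
  PySem.Int.mod
    ((PySem.List.pyRange 0 k 1).foldl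
      (fun res j => res + (pvOrdAt s (i + j) - 97 + 1) * power ^ j.toNat) 0)
    modulo

def subStrHash_alt (s : String) (power : Int) (modulo : Int) (k : Int) (hashValue : Int) : String :=
  let n : Int := PySem.Str.len s
  match (PySem.List.pyRange 0 (n - k + 1) 1).find?
      (fun i => pvWindowHash s power modulo k i == hashValue) with
  | some i => PySem.Str.slice s (some i) (some (i + k))
  | none => PySem.Str.slice s (some n) (some (n + k))

-- ===== PRECONDITION & SPEC =====
-- Pre_ excludes modulo = 0 (A raises ZeroDivisionError at the first `% m`) and k < 0, where
-- A's `pk = power ** k` is a Python FLOAT (unportable float semantics: A may raise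
-- ZeroDivisionError/IndexError there or return a float-driven result).
def Pre_subStrHash (s : String) (power : Int) (modulo : Int) (k : Int) (hashValue : Int) : Prop :=
  modulo ≠ 0 ∧ 0 ≤ k
instance (s : String) (power : Int) (modulo : Int) (k : Int) (hashValue : Int) : Decidable (Pre_subStrHash s power modulo k hashValue) := by unfold Pre_subStrHash; infer_instance

def pvWitness_subStrHash : String × Int × Int × Int × Int := ("ba", 1, 4, 2, 3)

def Spec_subStrHash (s : String) (power : Int) (modulo : Int) (k : Int) (hashValue : Int) (out : String) : Prop := out = subStrHash_alt s power modulo k hashValue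
instance (s : String) (power : Int) (modulo : Int) (k : Int) (hashValue : Int) (out : String) : Decidable (Spec_subStrHash s power modulo k hashValue out) := by unfold Spec_subStrHash; infer_instance

-- ===== CLAIM (what is proved, stated in full; the proofs are below) =====
def Claim_equal_subStrHash : Prop := ∀ (s : String) (power : Int) (modulo : Int) (k : Int) (hashValue : Int), Dom_subStrHash s power modulo k hashValue → Pre_subStrHash s power modulo k hashValue → Spec_subStrHash s power modulo k hashValue (subStrHash s power modulo k hashValue)

-- ===== LEMMAS AND PROOFS =====

-- reference value of character j and reference window power sum
def pvVal (cs : List Char) (j : Nat) : Int := ((cs.getD j ' ').toNat : Int) - 96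

def pvW (cs : List Char) (p : Int) (i k : Nat) : Int :=
  ∑ j ∈ Finset.range k, pvVal cs (i + j) * p ^ j

-- reference window hash at Nat index t
def pvHn (cs : List Char) (p m : Int) (kk : Nat) (t : Nat) : Int :=
  PySem.Int.mod (pvW cs p t kk) m

-- leftmost t < bound with reference hash = hv, else the fallback succ
def pvFinal (cs : List Char) (p m : Int) (kk : Nat) (hv : Int) (t : Nat) (succ : Int) : Int :=
  match (List.range t).find? (fun u => pvHn cs p m kk u == hv) with
  | some u => (u : Int)
  | none => succ

-- Python % m is determined by the residue class (for m ≠ 0)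
theorem pvmod_congr {m : Int} (hm : m ≠ 0) {a b : Int} (h : m ∣ a - b) :
    PySem.Int.mod a m = PySem.Int.mod b m := by
  have ha := PySem.Int.floordiv_mul_add_mod a m
  have hb := PySem.Int.floordiv_mul_add_mod b m
  have hd : m ∣ PySem.Int.mod a m - PySem.Int.mod b m := by
    have he : PySem.Int.mod a m - PySem.Int.mod b m
        = (a - b) - (PySem.Int.floordiv a m - PySem.Int.floordiv b m) * m := by ring_nf; omega
    rw [he]
    exact dvd_sub h (Dvd.dvd.mul_left (dvd_refl m) _)
  have habs : |PySem.Int.mod a m - PySem.Int.mod b m| < |m| := by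
    rcases lt_or_gt_of_ne hm with hneg | hpos
    · have b1 := PySem.Int.mod_neg_bounds a hneg
      have b2 := PySem.Int.mod_neg_bounds b hneg
      rw [abs_lt, abs_of_neg hneg]; omega
    · have b1 := PySem.Int.mod_nonneg a hpos
      have b2 := PySem.Int.mod_nonneg b hpos
      have c1 := PySem.Int.mod_lt a hpos
      have c2 := PySem.Int.mod_lt b hpos
      rw [abs_lt, abs_of_pos hpos]; omega
  have := Int.eq_zero_of_abs_lt_dvd ((abs_dvd m _).2 hd) habs
  omega

theorem pvW_shift (cs : List Char) (p : Int) (i k : Nat) :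
    p * pvW cs p (i + 1) k = pvW cs p i (k + 1) - pvVal cs i := by
  induction k with
  | zero => simp [pvW]
  | succ k ih =>
    have e1 : pvW cs p (i+1) (k+1) = pvW cs p (i+1) k + pvVal cs (i+1+k) * p ^ k := by
      simp [pvW, Finset.sum_range_succ]
    have e2 : pvW cs p i (k+1+1) = pvW cs p i (k+1) + pvVal cs (i+(k+1)) * p ^ (k+1) := by
      simp [pvW, Finset.sum_range_succ]
    rw [e1, e2, mul_add, ih]
    have h3 : i+1+k = i+(k+1) := by omega
    rw [h3]; ring

theorem pvW_roll (cs : List Char) (p : Int) (i k : Nat) :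
    pvW cs p i k = pvVal cs i + p * pvW cs p (i + 1) k - pvVal cs (i + k) * p ^ k := by
  have h := pvW_shift cs p i k
  have e : pvW cs p i (k+1) = pvW cs p i k + pvVal cs (i+k) * p ^ k := by
    simp [pvW, Finset.sum_range_succ]
  rw [h, e]; ring

theorem pv_enum_fold (p : Int) (l : List Char) : ∀ (srt : Nat) (acc : Int),
    (PySem.List.enumerate l (srt : Int)).foldl
      (fun res jv => res + ((jv.2.toNat : Int) - 97 + 1) * p ^ jv.1.toNat) acc
    = acc + ∑ j ∈ Finset.range l.length, pvVal l j * p ^ (srt + j) := by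
  induction l with
  | nil => intro srt acc; simp [PySem.List.enumerate_nil]
  | cons c l ih =>
    intro srt acc
    rw [PySem.List.enumerate_cons, List.foldl_cons]
    have hc : (srt : Int) + 1 = ((srt + 1 : Nat) : Int) := by push_cast; ring
    rw [hc, ih, List.length_cons, Finset.sum_range_succ']
    have e0 : ((srt : Int)).toNat = srt := Int.toNat_natCast srt
    simp only [e0]
    have hgd : ∀ x : Nat, ((c :: l).getD (1 + x) ' ') = l.getD x ' ' := by
      intro x
      have h5 : 1 + x = x + 1 := by omega
      rw [h5, List.getD_cons_succ]
    simp only [pvVal, List.getD_cons_zero]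
    ring_nf
    simp only [hgd]

theorem pvOrdAt_eq (s : String) (ii : Int) (h0 : 0 ≤ ii) (h1 : ii < (s.toList.length : Int)) :
    pvOrdAt s ii = ((s.toList.getD ii.toNat ' ').toNat : Int) := by
  have hlt : ii.toNat < s.toList.length := by omega
  rw [pvOrdAt]
  have hb : PySem.Str.pyGet? s ii = PySem.List.pyGet? s.toList ii := by simp [PySem.Str.pyGet?]
  rw [hb, PySem.List.pyGet?_of_nonneg _ h0, List.getElem?_eq_getElem hlt]
  simp [List.getD_eq_getElem?_getD, List.getElem?_eq_getElem hlt]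

theorem pv_direct_eq (s : String) (p m k i : Int) (hi : 0 ≤ i) (hk : 0 ≤ k)
    (hin : i + k ≤ (s.toList.length : Int)) :
    pvDirectHash s p m k i = pvHn s.toList p m k.toNat i.toNat := by
  have hik : 0 ≤ i + k := by omega
  have hsl : (PySem.Str.slice s (some i) (some (i + k))).toList
      = List.take ((i+k).toNat - i.toNat) (List.drop i.toNat s.toList) := by
    have hb : (PySem.Str.slice s (some i) (some (i+k))).toList
        = PySem.List.slice s.toList (some i) (some (i+k)) := by
      simp [PySem.Str.slice]
    rw [hb, PySem.List.slice_toNat s.toList hi hik]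
  have hkk : (i+k).toNat - i.toNat = k.toNat := by omega
  have hlen : (List.take k.toNat (List.drop i.toNat s.toList)).length = k.toNat := by
    rw [List.length_take, List.length_drop]; omega
  rw [pvDirectHash, hsl, hkk, pvHn]
  have h0 : (0 : Int) = ((0 : Nat) : Int) := rfl
  rw [h0, pv_enum_fold, hlen]
  congr 1
  simp only [Nat.cast_zero, zero_add]
  rw [pvW]
  apply Finset.sum_congr rfl
  intro j hj
  simp only [Finset.mem_range] at hj
  congr 1
  rw [pvVal, pvVal, List.getD_eq_getElem?_getD, List.getD_eq_getElem?_getD,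
    List.getElem?_take, if_pos hj, List.getElem?_drop]

theorem pv_list_range_fold (g : Nat → Int) : ∀ (n : Nat) (acc : Int),
    (List.range n).foldl (fun res t => res + g t) acc = acc + ∑ j ∈ Finset.range n, g j := by
  intro n
  induction n with
  | zero => simp
  | succ n ih =>
    intro acc
    rw [List.range_succ, List.foldl_append, ih, Finset.sum_range_succ]
    simp; ring

theorem pv_window_eq (s : String) (p m k i : Int) (hi : 0 ≤ i) (hk : 0 ≤ k)
    (hin : i + k ≤ (s.toList.length : Int)) :
    pvWindowHash s p m k i = pvHn s.toList p m k.toNat i.toNat := by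
  rw [pvWindowHash, PySem.List.pyRange_one, List.foldl_map, pv_list_range_fold, pvHn]
  congr 1
  rw [zero_add, pvW]
  have hr : (k - 0).toNat = k.toNat := by omega
  rw [hr]
  apply Finset.sum_congr rfl
  intro j hj
  simp only [Finset.mem_range] at hj
  have hjk : (j : Int) < k := by omega
  have e1 : pvOrdAt s (i + (0 + (j:Int))) = ((s.toList.getD (i.toNat + j) ' ').toNat : Int) := by
    rw [zero_add, pvOrdAt_eq s (i + j) (by omega) (by omega)]
    have e3 : (i + (j:Int)).toNat = i.toNat + j := by omega
    rw [e3]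
  rw [e1, pvVal]
  have e2 : ((0 + (j:Int))).toNat = j := by omega
  rw [e2]
  ring

-- find? only depends on the predicate's values on the list
theorem pv_find?_congr {α : Type} (l : List α) (p q : α → Bool)
    (h : ∀ x ∈ l, p x = q x) : l.find? p = l.find? q := by
  induction l with
  | nil => rfl
  | cons x xs ih =>
    simp only [List.find?]
    rw [h x (by simp)]
    cases q x
    · exact ih (fun y hy => h y (by simp [hy]))
    · rfl

-- hash_function with pre = None computes the reference window hash
theorem pv_hash_none (s : String) (p m k i : Int) (hi : 0 ≤ i) (hk : 0 ≤ k)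
    (hin : i + k ≤ (s.toList.length : Int)) :
    pvHashFunction s p m k (p ^ k.toNat) i none = pvHn s.toList p m k.toNat i.toNat := by
  rw [pvHashFunction]
  exact pv_direct_eq s p m k i hi hk hin

-- hash_function with pre = hash of window i+1 computes the reference hash of window i
theorem pv_hash_some (s : String) (p m k i : Int) (hm : m ≠ 0) (hi : 0 ≤ i) (hk : 0 ≤ k)
    (hin : i + k < (s.toList.length : Int)) :
    pvHashFunction s p m k (p ^ k.toNat) i (some (pvHn s.toList p m k.toNat (i.toNat + 1)))
    = pvHn s.toList p m k.toNat i.toNat := by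
  rw [pvHashFunction]
  by_cases h0 : pvHn s.toList p m k.toNat (i.toNat + 1) = 0
  · rw [if_pos h0]
    exact pv_direct_eq s p m k i hi hk (le_of_lt hin)
  · rw [if_neg h0]
    have o1 : pvOrdAt s i = ((s.toList.getD i.toNat ' ').toNat : Int) :=
      pvOrdAt_eq s i hi (by omega)
    have o2 : pvOrdAt s (i + k) = ((s.toList.getD (i.toNat + k.toNat) ' ').toNat : Int) := by
      rw [pvOrdAt_eq s (i+k) (by omega) (by omega)]
      have e3 : (i + k).toNat = i.toNat + k.toNat := by omega
      rw [e3]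
    rw [o1, o2]
    conv_rhs => rw [pvHn]
    apply pvmod_congr hm
    have hw := PySem.Int.floordiv_mul_add_mod (pvW s.toList p (i.toNat + 1) k.toNat) m
    have hroll := pvW_roll s.toList p i.toNat k.toNat
    have hdvd : m ∣ (pvHn s.toList p m k.toNat (i.toNat + 1) - pvW s.toList p (i.toNat + 1) k.toNat) := by
      refine ⟨-(PySem.Int.floordiv (pvW s.toList p (i.toNat + 1) k.toNat) m), ?_⟩
      rw [pvHn]
      linear_combination hw
    have hdiff : ((((s.toList.getD i.toNat ' ').toNat : Int) - 97 + 1) + p * pvHn s.toList p m k.toNat (i.toNat + 1)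
          - (((s.toList.getD (i.toNat + k.toNat) ' ').toNat : Int) - 97 + 1) * p ^ k.toNat)
          - pvW s.toList p i.toNat k.toNat
        = p * (pvHn s.toList p m k.toNat (i.toNat + 1) - pvW s.toList p (i.toNat + 1) k.toNat) := by
      rw [hroll, pvVal, pvVal]
      ring
    rw [hdiff]
    exact Dvd.dvd.mul_left hdvd p

-- peeling the probe of index t off the leftmost-match search
theorem pvFinal_succ (cs : List Char) (p m : Int) (kk : Nat) (hv : Int) (t : Nat) (succ : Int) :
    pvFinal cs p m kk hv (t + 1) succ
    = pvFinal cs p m kk hv t (if pvHn cs p m kk t == hv then (t : Int) else succ) := by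
  rw [pvFinal, pvFinal, List.range_succ, List.find?_append]
  cases hf : (List.range t).find? (fun u => pvHn cs p m kk u == hv) with
  | some u => simp
  | none =>
    simp only [Option.none_or]
    cases hb : (pvHn cs p m kk t == hv) with
    | true => simp [hb]
    | false => simp [hb]

-- running A's loop from index j down to 0, entering with h = hash of window j+1
theorem pv_loopA (s : String) (p m k hv : Int) (hm : m ≠ 0) (hk : 0 ≤ k) :
    ∀ (j : Nat), ((j : Int) ≤ (s.toList.length : Int) - k - 1) → ∀ (succ : Int),
    (PySem.List.pyRange (j : Int) (-1) (-1)).foldl (pvStepA s p m k hv (p ^ k.toNat))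
      (succ, some (pvHn s.toList p m k.toNat (j + 1)))
    = (pvFinal s.toList p m k.toNat hv (j + 1) succ, some (pvHn s.toList p m k.toNat 0)) := by
  intro j
  induction j with
  | zero =>
    intro hj succ
    simp only [Nat.cast_zero]
    rw [PySem.List.pyRange_neg_one_cons (by omega : (-1:Int) < 0)]
    rw [show ((0:Int) - 1) = -1 by ring, PySem.List.pyRange_neg_one_eq_nil (by omega)]
    rw [List.foldl_cons, List.foldl_nil, pvStepA]
    have hs : pvHashFunction s p m k (p ^ k.toNat) 0 (some (pvHn s.toList p m k.toNat (0 + 1)))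
        = pvHn s.toList p m k.toNat 0 := by
      have := pv_hash_some s p m k 0 hm (by omega) hk (by omega)
      simpa using this
    rw [hs, pvFinal]
    cases hb : (pvHn s.toList p m k.toNat 0 == hv) with
    | true => simp [List.range_one, hb]
    | false => simp [List.range_one, hb]
  | succ j ih =>
    intro hj succ
    have hc : ((j + 1 : Nat) : Int) = (j : Int) + 1 := by push_cast; ring
    rw [hc, PySem.List.pyRange_neg_one_cons (by omega : (-1:Int) < (j:Int) + 1)]
    rw [show ((j:Int) + 1 - 1) = (j:Int) by ring]
    rw [List.foldl_cons, pvStepA]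
    have hs : pvHashFunction s p m k (p ^ k.toNat) ((j:Int) + 1)
        (some (pvHn s.toList p m k.toNat (j + 1 + 1))) = pvHn s.toList p m k.toNat (j + 1) := by
      have hh := pv_hash_some s p m k ((j:Int)+1) hm (by omega) hk (by omega)
      have e4 : ((j:Int)+1).toNat = j + 1 := by omega
      rw [e4] at hh
      exact hh
    rw [hs]
    have hrec := ih (by omega) (if pvHn s.toList p m k.toNat (j+1) == hv then ((j:Int)+1) else succ)
    simp only [] at hrec ⊢
    rw [hrec, pvFinal_succ s.toList p m k.toNat hv (j+1) succ]
    have e5 : ((j + 1 : Nat) : Int) = (j:Int) + 1 := by push_cast; ring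
    rw [e5]

-- A's whole loop, from the initial state (n, None)
theorem pv_runA (s : String) (p m k hv : Int) (hm : m ≠ 0) (hk : 0 ≤ k)
    (hN : 0 ≤ (s.toList.length : Int) - k) :
    (PySem.List.pyRange ((s.toList.length : Int) - k) (-1) (-1)).foldl
      (pvStepA s p m k hv (p ^ k.toNat)) ((s.toList.length : Int), none)
    = (pvFinal s.toList p m k.toNat hv (((s.toList.length : Int) - k).toNat + 1)
        (s.toList.length : Int), some (pvHn s.toList p m k.toNat 0)) := by
  rw [PySem.List.pyRange_neg_one_cons (by omega : (-1:Int) < (s.toList.length : Int) - k)]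
  rw [List.foldl_cons, pvStepA]
  have hs : pvHashFunction s p m k (p ^ k.toNat) ((s.toList.length : Int) - k) none
      = pvHn s.toList p m k.toNat (((s.toList.length : Int) - k).toNat) :=
    pv_hash_none s p m k _ (by omega) hk (by omega)
  rw [hs]
  rcases eq_or_lt_of_le hN with hN0 | hNpos
  · rw [show ((s.toList.length : Int) - k - 1) = -1 by omega,
      PySem.List.pyRange_neg_one_eq_nil (by omega : (-1:Int) ≤ -1), List.foldl_nil]
    have e0 : ((s.toList.length : Int) - k).toNat = 0 := by omega
    rw [e0, pvFinal]
    cases hb : (pvHn s.toList p m k.toNat 0 == hv) with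
    | true =>
      rw [show ((s.toList.length : Int) - k) = 0 by omega]
      simp [hb]
    | false => simp [hb]
  · have hj : (((s.toList.length : Int) - k - 1).toNat : Int)
        = (s.toList.length : Int) - k - 1 := by omega
    have e1 : ((s.toList.length : Int) - k).toNat
        = ((s.toList.length : Int) - k - 1).toNat + 1 := by omega
    rw [e1]
    have hrun := pv_loopA s p m k hv hm hk (((s.toList.length : Int) - k - 1).toNat)
      (by omega) (if pvHn s.toList p m k.toNat (((s.toList.length : Int) - k - 1).toNat + 1) == hv
        then (s.toList.length : Int) - k else (s.toList.length : Int))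
    rw [hj] at hrun
    rw [hrun, pvFinal_succ s.toList p m k.toNat hv
      (((s.toList.length : Int) - k - 1).toNat + 1) (s.toList.length : Int)]
    have e2 : ((((s.toList.length : Int) - k - 1).toNat + 1 : Nat) : Int)
        = (s.toList.length : Int) - k := by omega
    rw [e2]

-- B's search, rewritten over Nat indices
theorem pv_runB (s : String) (p m k hv : Int) (hk : 0 ≤ k)
    (hN : 0 ≤ (s.toList.length : Int) - k) :
    (PySem.List.pyRange 0 ((s.toList.length : Int) - k + 1) 1).find?
      (fun i => pvWindowHash s p m k i == hv)
    = ((List.range (((s.toList.length : Int) - k).toNat + 1)).find?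
        (fun u => pvHn s.toList p m k.toNat u == hv)).map (fun t : Nat => 0 + (t : Int)) := by
  rw [PySem.List.pyRange_one, List.find?_map]
  have e1 : (((s.toList.length : Int) - k + 1) - 0).toNat
      = ((s.toList.length : Int) - k).toNat + 1 := by omega
  rw [e1]
  congr 1
  apply pv_find?_congr
  intro t ht
  simp only [List.mem_range] at ht
  simp only [Function.comp]
  have hw := pv_window_eq s p m k (0 + (t:Int)) (by omega) hk (by omega)
  rw [hw]
  have e2 : ((0 + (t:Int))).toNat = t := by omega
  rw [e2]

-- ===== VERDICT (by name: the statement is the Claim_ definition above) =====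
theorem subStrHash_spec : Claim_equal_subStrHash := by
  intro s power modulo k hashValue _hdom hpre
  obtain ⟨hm, hk⟩ := hpre
  show subStrHash s power modulo k hashValue = subStrHash_alt s power modulo k hashValue
  rw [subStrHash, subStrHash_alt]
  simp only [PySem.Str.len_eq]
  by_cases hN : 0 ≤ (s.toList.length : Int) - k
  · rw [pv_runA s power modulo k hashValue hm hk hN,
      pv_runB s power modulo k hashValue hk hN]
    cases hf : (List.range (((s.toList.length : Int) - k).toNat + 1)).find?
        (fun u => pvHn s.toList power modulo k.toNat u == hashValue) with
    | some u =>
      simp only [hf, Option.map_some, pvFinal, zero_add]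
    | none =>
      simp only [hf, Option.map_none, pvFinal]
  · push Not at hN
    rw [PySem.List.pyRange_neg_one_eq_nil (by omega : (s.toList.length : Int) - k ≤ -1),
      PySem.List.pyRange_one_eq_nil (by omega : (s.toList.length : Int) - k + 1 ≤ 0)]
    rfl
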